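-- pv_equiv track=rewrite | github.com/PulgoMaster/Pulgo-Elden-Ring-Nightreign-Relic-Farming-Bot | ui/relic_builder.py | _entry_label
-- ===== SOURCE A (Python) =====
-- def _entry_label(entry: dict) -> str:
--     """Display string for a pool entry in the listbox."""
--     accepted = entry.get("accepted", [])
--     if not accepted:
--         return "(empty)"
--     if len(accepted) == 1:
--         return accepted[0]
--     prefix = accepted[0]
--     for a in accepted[1:]:
--         while prefix and not a.startswith(prefix):
--             prefix = prefix[:-1]
--     prefix = prefix.rstrip()
--     if prefix:
--         suffixes = [a[len(prefix):].strip() for a in accepted]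
--         return f"{prefix} ({', '.join(suffixes)})"
--     return " / ".join(accepted)
-- ===== SOURCE B (Python) =====
-- def _entry_label(entry: dict) -> str:
--     """Display string for a pool entry in the listbox."""
--     accepted = entry.get("accepted", [])
--     if not accepted:
--         return "(empty)"
--     if len(accepted) == 1:
--         return accepted[0]
--     prefix_chars = []
--     for chars in zip(*accepted):
--         if all(c == chars[0] for c in chars):
--             prefix_chars.append(chars[0])
--         else:
--             break
--     prefix = "".join(prefix_chars).rstrip()
--     if prefix:
--         suffixes = [a[len(prefix):].strip() for a in accepted]
--         return f"{prefix} ({', '.join(suffixes)})"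
--     return " / ".join(accepted)
-- ===== Notes on version B (the rewrite author's own statement) =====
-- stated objective: idiomatic
-- what changed: The common-prefix computation is replaced: instead of shrinking the first string from the end against each other string (a while-loop per string), B scans columns via zip(*accepted) and collects characters while each column is uniform, breaking at the first mismatch; the formatting code is unchanged.
import Mathlib
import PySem

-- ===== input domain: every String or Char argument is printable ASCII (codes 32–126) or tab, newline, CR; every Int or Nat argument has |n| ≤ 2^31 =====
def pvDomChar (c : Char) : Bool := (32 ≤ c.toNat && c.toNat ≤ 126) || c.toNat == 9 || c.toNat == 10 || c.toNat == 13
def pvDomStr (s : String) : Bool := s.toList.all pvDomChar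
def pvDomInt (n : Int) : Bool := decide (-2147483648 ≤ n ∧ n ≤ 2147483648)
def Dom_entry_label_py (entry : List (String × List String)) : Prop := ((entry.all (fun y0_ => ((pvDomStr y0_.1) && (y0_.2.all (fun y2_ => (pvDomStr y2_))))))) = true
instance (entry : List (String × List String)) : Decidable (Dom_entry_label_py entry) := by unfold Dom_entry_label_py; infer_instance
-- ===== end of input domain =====

-- B replaces A's shrink-from-the-first-string common-prefix loop by a column-wise zip scan (idiomatic, no speed claim); formatting is unchanged.

-- ===== PORT A =====
-- while prefix and not a.startswith(prefix): prefix = prefix[:-1]   (prefix[:-1] = dropLast, exact)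
def pvShrink (p a : List Char) : List Char :=
  if h : p ≠ [] ∧ ¬ PySem.Chars.startswith a p then pvShrink p.dropLast a else p
termination_by p.length
decreasing_by
  cases p with
  | nil => exact absurd rfl h.1
  | cons x xs => simp

def entry_label_py (entry : List (String × List String)) : String :=
  match (PySem.Dict.ofList entry).getD "accepted" ([] : List String) with
  | [] => "(empty)"
  | [a] => a
  | a0 :: a1 :: rest =>
      -- prefix = accepted[0]; for a in accepted[1:]: while …
      let pfx := (a1 :: rest).foldl (fun p a => pvShrink p a.toList) a0.toList
      let pfx := PySem.Chars.rstrip pfx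
      if pfx ≠ [] then
        -- a[len(prefix):] with a nonnegative bound is List.drop (PySem.List.slice_from)
        String.ofList (pfx ++ " (".toList ++
          PySem.Chars.join ", ".toList
            ((a0 :: a1 :: rest).map (fun a => PySem.Chars.strip (a.toList.drop pfx.length))) ++
          ")".toList)
      else
        PySem.Str.join " / " (a0 :: a1 :: rest)

-- ===== PORT B =====
-- one tuple of zip(*xss): heads of all lists, plus the tails; none when some list is empty
def pvHeadsTails : List (List Char) → Option (List Char × List (List Char))
  | [] => some ([], [])
  | [] :: _ => none
  | (c :: cs) :: rest => (pvHeadsTails rest).map (fun p => (c :: p.1, cs :: p.2))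

-- zip(*xss) as a list of columns (tuples rendered as lists)
def pvZip : List (List Char) → List (List Char)
  | [] => []
  | [] :: _ => []
  | (c :: cs) :: rest =>
      match pvHeadsTails rest with
      | none => []
      | some (hs, ts) => (c :: hs) :: pvZip (cs :: ts)
termination_by xss => xss.headI.length
decreasing_by simp [List.headI]

-- for chars in zipped: if all equal append chars[0] else break
def pvTakeCols : List (List Char) → List Char
  | [] => []
  | [] :: _ => []
  | (c :: cs) :: rest => if cs.all (· == c) then c :: pvTakeCols rest else []

def entry_label_py_alt (entry : List (String × List String)) : String :=
  match (PySem.Dict.ofList entry).getD "accepted" ([] : List String) with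
  | [] => "(empty)"
  | [a] => a
  | a0 :: a1 :: rest =>
      let pfx := pvTakeCols (pvZip ((a0 :: a1 :: rest).map String.toList))
      let pfx := PySem.Chars.rstrip pfx
      if pfx ≠ [] then
        String.ofList (pfx ++ " (".toList ++
          PySem.Chars.join ", ".toList
            ((a0 :: a1 :: rest).map (fun a => PySem.Chars.strip (a.toList.drop pfx.length))) ++
          ")".toList)
      else
        PySem.Str.join " / " (a0 :: a1 :: rest)

-- ===== PRECONDITION & SPEC =====
def Spec_entry_label_py (entry : List (String × List String)) (out : String) : Prop := out = entry_label_py_alt entry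
instance (entry : List (String × List String)) (out : String) : Decidable (Spec_entry_label_py entry out) := by unfold Spec_entry_label_py; infer_instance

-- ===== CLAIM (what is proved, stated in full; the proofs are below) =====
def Claim_equal_entry_label_py : Prop := ∀ (entry : List (String × List String)), Dom_entry_label_py entry → Spec_entry_label_py entry (entry_label_py entry)

-- ===== LEMMAS AND PROOFS =====
-- longest common prefix of two lists
def pvLcp : List Char → List Char → List Char
  | a :: as, b :: bs => if a = b then a :: pvLcp as bs else []
  | _, _ => []

lemma pvLcp_of_prefix : ∀ (p a : List Char), p <+: a → pvLcp p a = p := by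
  intro p
  induction p with
  | nil => intro a _; cases a <;> rfl
  | cons c cs ih =>
      intro a hp
      cases a with
      | nil => simp at hp
      | cons d ds =>
          rw [List.cons_prefix_cons] at hp
          simp [pvLcp, hp.1, ih ds hp.2]

lemma pvLcp_dropLast : ∀ (p a : List Char), ¬ p <+: a → pvLcp p a = pvLcp p.dropLast a := by
  intro p
  induction p with
  | nil => intro a h; exact absurd (List.nil_prefix) h
  | cons c cs ih =>
      intro a h
      cases a with
      | nil =>
          cases cs with
          | nil => rfl
          | cons e cs' => rfl
      | cons d ds =>
          by_cases hcd : c = d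
          · subst hcd
            have hns : ¬ cs <+: ds := fun hp => h (List.cons_prefix_cons.mpr ⟨rfl, hp⟩)
            cases cs with
            | nil => exact absurd List.nil_prefix hns
            | cons e cs' =>
                simp only [pvLcp, List.dropLast_cons₂]
                rw [ih ds hns]
          · cases cs with
            | nil => simp [pvLcp, hcd]
            | cons e cs' => simp [pvLcp, hcd, List.dropLast_cons₂]

theorem pvShrink_eq_lcp (p a : List Char) : pvShrink p a = pvLcp p a := by
  rw [pvShrink]
  split
  · next h =>
      have hnp : ¬ p <+: a := by
        simpa [PySem.Chars.startswith_iff] using h.2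
      rw [pvShrink_eq_lcp p.dropLast a, ← pvLcp_dropLast p a hnp]
  · next h =>
      by_cases hp : p = []
      · subst hp; cases a <;> rfl
      · have hsw : PySem.Chars.startswith a p = true := by
          by_contra hc
          exact h ⟨hp, by simpa using hc⟩
        exact (pvLcp_of_prefix p a ((PySem.Chars.startswith_iff a p).mp hsw)).symm
termination_by p.length
decreasing_by
  rename_i h
  cases p with
  | nil => exact absurd rfl h.1
  | cons x xs => simp

lemma pvZip_singleton : ∀ (h : List Char), pvTakeCols (pvZip [h]) = h := by
  intro h
  induction h with
  | nil => simp [pvZip, pvTakeCols]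
  | cons c cs ih => simp [pvZip, pvHeadsTails, pvTakeCols, ih]

lemma pvZip_lcp_step : ∀ (h a : List Char) (t : List (List Char)),
    pvTakeCols (pvZip (h :: a :: t)) = pvTakeCols (pvZip (pvLcp h a :: t)) := by
  intro h
  induction h with
  | nil => intro a t; cases a <;> simp [pvZip, pvLcp]
  | cons c cs ih =>
      intro a t
      cases a with
      | nil =>
          simp [pvZip, pvHeadsTails, pvLcp, pvTakeCols]
      | cons d ds =>
          by_cases hcd : c = d
          · subst hcd
            simp only [pvLcp]
            cases hht : pvHeadsTails t with
            | none => simp [pvZip, pvHeadsTails, hht]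
            | some p =>
                obtain ⟨hs, ts⟩ := p
                by_cases hall : hs.all (· == c)
                · simp [pvZip, pvHeadsTails, hht, pvTakeCols, hall, ih ds ts]
                · simp [pvZip, pvHeadsTails, hht, pvTakeCols, hall]
          · simp only [pvLcp, if_neg hcd]
            cases hht : pvHeadsTails t with
            | none => simp [pvZip, pvHeadsTails, hht]
            | some p =>
                obtain ⟨hs, ts⟩ := p
                simp [pvZip, pvHeadsTails, hht, pvTakeCols, Ne.symm hcd]

lemma pvMain : ∀ (rest : List (List Char)) (a0 : List Char),
    rest.foldl (fun p a => pvShrink p a) a0 = pvTakeCols (pvZip (a0 :: rest)) := by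
  intro rest
  induction rest with
  | nil => intro a0; simp [List.foldl, pvZip_singleton]
  | cons a t ih =>
      intro a0
      rw [List.foldl_cons, ih (pvShrink a0 a), pvShrink_eq_lcp, pvZip_lcp_step]

-- ===== VERDICT (by name: the statement is the Claim_ definition above) =====
theorem entry_label_py_spec : Claim_equal_entry_label_py := by
  intro entry _
  unfold Spec_entry_label_py entry_label_py entry_label_py_alt
  generalize (PySem.Dict.ofList entry).getD "accepted" ([] : List String) = acc
  match acc with
  | [] => rfl
  | [a] => rfl
  | a0 :: a1 :: rest =>
      simp only
      have h : (a1 :: rest).foldl (fun p a => pvShrink p a.toList) a0.toList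
          = pvTakeCols (pvZip ((a0 :: a1 :: rest).map String.toList)) := by
        rw [← List.foldl_map (f := String.toList) (g := fun p a => pvShrink p a),
          pvMain ((a1 :: rest).map String.toList) a0.toList]
        rfl
      rw [h]
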